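-- pv_equiv track=rewrite | github.com/Arnie9203/mps_benchmark | benchmark/experiments/scale_benchmark.py | _tail_eventually
-- ===== SOURCE A (Python) =====
-- from typing import Dict, List, Tuple
--
-- def _tail_eventually(truths: List[bool], tail_window: int) -> Tuple[set[int], set[int]]:
--     omega_plus = set()
--     omega_minus = set()
--     N_max = len(truths)
--     for i in range(tail_window, N_max + 1):
--         if all(truths[i - tail_window : i]):
--             omega_plus.add(i)
--         if not any(truths[i - tail_window : i]):
--             omega_minus.add(i)
--     return omega_plus, omega_minus
-- ===== SOURCE B (Python) =====
-- def _tail_eventually(truths, tail_window):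
--     omega_plus = set()
--     omega_minus = set()
--     if tail_window < 0:
--         return omega_plus, omega_minus
--     n = len(truths)
--     cnt = sum(truths[:tail_window])
--     for j in range(tail_window, n + 1):
--         if cnt == tail_window:
--             omega_plus.add(j)
--         if cnt == 0:
--             omega_minus.add(j)
--         if j < n:
--             cnt += truths[j] - truths[j - tail_window]
--     return omega_plus, omega_minus
-- ===== Notes on version B (the rewrite author's own statement) =====
-- stated objective: faster
-- what changed: Replaces A's per-position re-scan of the whole window (all/any over a fresh slice for every i) by a single pass that maintains a sliding count of True values, updated in O(1) per position.
-- intended difference: For tail_window < 0 A returns sets of spurious (mostly negative) window-end positions produced by Python's negative-slice clamping (omega_plus always contains 0), while B returns two empty sets, the intended value since no window of negative length exists. — e.g. on _tail_eventually([true], -1): A returns ([-1, 0, 1], [-1, 0, 1]), B returns ([], [])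
import Mathlib
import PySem

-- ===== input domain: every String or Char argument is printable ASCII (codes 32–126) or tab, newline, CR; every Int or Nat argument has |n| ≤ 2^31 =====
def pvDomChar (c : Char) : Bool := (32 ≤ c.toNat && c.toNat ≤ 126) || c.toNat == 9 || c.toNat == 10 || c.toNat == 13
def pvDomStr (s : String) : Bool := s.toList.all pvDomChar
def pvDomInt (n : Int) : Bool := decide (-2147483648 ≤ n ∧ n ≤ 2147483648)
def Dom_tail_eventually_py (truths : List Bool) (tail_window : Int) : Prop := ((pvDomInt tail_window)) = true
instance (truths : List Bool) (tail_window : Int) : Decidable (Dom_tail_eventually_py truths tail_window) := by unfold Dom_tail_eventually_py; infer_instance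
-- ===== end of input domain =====

-- B replaces A's per-position window re-scan (all/any over a fresh slice) by a single pass with a
-- sliding count of True values; objective: faster (O(N) instead of O(N·window)).

-- ===== PORT A =====
-- loop body of A: the two slice tests and set insertions for one window end i
def pvStepA (truths : List Bool) (tail_window : Int)
    (st : List Int × List Int) (i : Int) : List Int × List Int :=
  let st1 := if (PySem.List.slice truths (some (i - tail_window)) (some i)).all (fun b => b)
             then PySem.Set.add st.1 i else st.1
  let st2 := if !((PySem.List.slice truths (some (i - tail_window)) (some i)).any (fun b => b))
             then PySem.Set.add st.2 i else st.2
  (st1, st2)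

def tail_eventually_py (truths : List Bool) (tail_window : Int) : List Int × List Int :=
  let N_max : Int := truths.length
  (PySem.List.pyRange tail_window (N_max + 1) 1).foldl (pvStepA truths tail_window)
    ((PySem.Set.empty : PySem.Set Int), (PySem.Set.empty : PySem.Set Int))

-- ===== PORT B =====
-- loop body of B: test the running count, then slide it by one position
def pvStepB (truths : List Bool) (tail_window : Int)
    (st : (List Int × List Int) × Int) (j : Int) : (List Int × List Int) × Int :=
  let p := if st.2 = tail_window then PySem.Set.add st.1.1 j else st.1.1
  let m := if st.2 = 0 then PySem.Set.add st.1.2 j else st.1.2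
  let c := if j < (truths.length : Int) then
      st.2 + ((if PySem.List.pyGetD truths j false then (1 : Int) else 0)
            - (if PySem.List.pyGetD truths (j - tail_window) false then (1 : Int) else 0))
    else st.2
  ((p, m), c)

def tail_eventually_py_alt (truths : List Bool) (tail_window : Int) : List Int × List Int :=
  if tail_window < 0 then ((PySem.Set.empty : PySem.Set Int), (PySem.Set.empty : PySem.Set Int))
  else
    let n : Int := truths.length
    let cnt : Int := ((PySem.List.slice truths (some 0) (some tail_window)).map
                       (fun b => if b then (1 : Int) else 0)).sum
    ((PySem.List.pyRange tail_window (n + 1) 1).foldl (pvStepB truths tail_window)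
      (((PySem.Set.empty : PySem.Set Int), (PySem.Set.empty : PySem.Set Int)), cnt)).1

-- ===== PRECONDITION & SPEC =====
-- For tail_window < 0 A returns sets of (mostly negative) "window ends" produced by Python's
-- negative-slice clamping (omega_plus always contains 0), while B returns two empty sets — the
-- intended value, since no window of negative length exists.
def D_tail_eventually_py (truths : List Bool) (tail_window : Int) : Prop := tail_window < 0
instance (truths : List Bool) (tail_window : Int) : Decidable (D_tail_eventually_py truths tail_window) := by
  unfold D_tail_eventually_py; infer_instance

def Spec_tail_eventually_py (truths : List Bool) (tail_window : Int) (out : List Int × List Int) : Prop :=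
  ¬ D_tail_eventually_py truths tail_window → out = tail_eventually_py_alt truths tail_window
instance (truths : List Bool) (tail_window : Int) (out : List Int × List Int) : Decidable (Spec_tail_eventually_py truths tail_window out) := by
  unfold Spec_tail_eventually_py; infer_instance

def pvDiffWitness_tail_eventually_py : List Bool × Int := ([true], -1)
def pvDiffWitnessOut_tail_eventually_py : (List Int × List Int) × (List Int × List Int) :=
  (([-1, 0, 1], [-1, 0, 1]), ([], []))

-- ===== CLAIM (what is proved, stated in full; the proofs are below) =====
def Claim_unchanged_tail_eventually_py : Prop := ∀ (truths : List Bool) (tail_window : Int), Dom_tail_eventually_py truths tail_window → Spec_tail_eventually_py truths tail_window (tail_eventually_py truths tail_window)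
def Claim_changed_tail_eventually_py : Prop := Dom_tail_eventually_py (pvDiffWitness_tail_eventually_py.1) (pvDiffWitness_tail_eventually_py.2) ∧ D_tail_eventually_py (pvDiffWitness_tail_eventually_py.1) (pvDiffWitness_tail_eventually_py.2) ∧ tail_eventually_py (pvDiffWitness_tail_eventually_py.1) (pvDiffWitness_tail_eventually_py.2) = pvDiffWitnessOut_tail_eventually_py.1 ∧ tail_eventually_py_alt (pvDiffWitness_tail_eventually_py.1) (pvDiffWitness_tail_eventually_py.2) = pvDiffWitnessOut_tail_eventually_py.2 ∧ pvDiffWitnessOut_tail_eventually_py.1 ≠ pvDiffWitnessOut_tail_eventually_py.2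
def Claim_exact_tail_eventually_py : Prop := ∀ (truths : List Bool) (tail_window : Int), Dom_tail_eventually_py truths tail_window → D_tail_eventually_py truths tail_window → tail_eventually_py truths tail_window ≠ tail_eventually_py_alt truths tail_window

-- ===== LEMMAS AND PROOFS =====

-- the window of length t ending at position a
def pvWin (l : List Bool) (t a : Nat) : List Bool := (l.drop (a - t)).take t

lemma pvSlice_win (l : List Bool) (t a : Nat) (ht : t ≤ a) :
    PySem.List.slice l (some ((a : Int) - (t : Int))) (some (a : Int)) = pvWin l t a := by
  have h : (a : Int) - (t : Int) = ((a - t : Nat) : Int) := by omega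
  rw [h, PySem.List.slice_natCast]
  unfold pvWin
  have h2 : a - (a - t) = t := by omega
  rw [h2]

lemma pvWin_length (l : List Bool) (t a : Nat) (ht : t ≤ a) (ha : a ≤ l.length) :
    (pvWin l t a).length = t := by
  simp [pvWin]
  omega

lemma pvAll_iff (w : List Bool) :
    (w.all (fun b => b) = true) ↔ w.countP (fun b => b) = w.length := by
  rw [List.all_eq_true, List.countP_eq_length]

lemma pvAny_iff (w : List Bool) :
    (w.any (fun b => b) = false) ↔ w.countP (fun b => b) = 0 := by
  rw [← Bool.not_eq_true, List.any_eq_true, List.countP_eq_zero]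
  simp

-- prefix decomposition of the window count
lemma pvWin_count (l : List Bool) (t a : Nat) (ht : t ≤ a) :
    ((l.take (a - t)).countP (fun b => b)) + (pvWin l t a).countP (fun b => b)
      = (l.take a).countP (fun b => b) := by
  unfold pvWin
  rw [← List.countP_append, ← List.take_add]
  have h2 : a - t + t = a := by omega
  rw [h2]

-- one prefix step
lemma pvPrefix_step (l : List Bool) (a : Nat) (ha : a < l.length) :
    (((l.take (a + 1)).countP (fun b => b) : Int))
      = ((l.take a).countP (fun b => b) : Int)
        + (if l.getD a false then (1 : Int) else 0) := by
  have h1 : l.take (a + 1) = l.take a ++ [l[a]] := by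
    rw [List.take_succ, List.getElem?_eq_getElem ha]
    rfl
  have h2 : l.getD a false = l[a] := by
    simp [List.getD_eq_getElem?_getD, List.getElem?_eq_getElem ha]
  rw [h1, List.countP_append, h2]
  by_cases hb : l[a] = true <;> simp [hb]

-- the main loop invariant: the two folds agree, given cnt = count of the current window
lemma pvLoop (l : List Bool) (t : Nat) :
    ∀ (m a : Nat), a + m = l.length + 1 → t ≤ a →
    ∀ (P M : List Int) (c : Int),
      (a ≤ l.length → c = ((pvWin l t a).countP (fun b => b) : Int)) →
      (PySem.List.pyRange (a : Int) ((l.length : Int) + 1) 1).foldl (pvStepA l (t : Int)) (P, M)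
        = ((PySem.List.pyRange (a : Int) ((l.length : Int) + 1) 1).foldl (pvStepB l (t : Int)) ((P, M), c)).1 := by
  intro m
  induction m with
  | zero =>
    intro a hm ht P M c hc
    rw [PySem.List.pyRange_one_eq_nil (by omega : ((l.length : Int) + 1) ≤ (a : Int))]
    rfl
  | succ m ih =>
    intro a hm ht P M c hc
    have ha : a ≤ l.length := by omega
    have hcnt : c = ((pvWin l t a).countP (fun b => b) : Int) := hc ha
    have hwlen : (pvWin l t a).length = t := pvWin_length l t a ht ha
    have e1 : ((PySem.List.slice l (some ((a : Int) - (t : Int))) (some (a : Int))).all (fun b => b) = true)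
        ↔ c = (t : Int) := by
      rw [pvSlice_win l t a ht, pvAll_iff, hwlen, hcnt]
      exact Nat.cast_inj.symm
    have e2 : ((!(PySem.List.slice l (some ((a : Int) - (t : Int))) (some (a : Int))).any (fun b => b)) = true)
        ↔ c = 0 := by
      rw [Bool.not_eq_eq_eq_not, Bool.not_true, pvSlice_win l t a ht, pvAny_iff, hcnt]
      exact Nat.cast_eq_zero.symm
    have hA : pvStepA l (t : Int) (P, M) (a : Int)
        = (if c = (t : Int) then PySem.Set.add P (a : Int) else P,
           if c = 0 then PySem.Set.add M (a : Int) else M) := by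
      unfold pvStepA
      rw [if_congr e1 rfl rfl, if_congr e2 rfl rfl]
    have hB : pvStepB l (t : Int) ((P, M), c) (a : Int)
        = ((if c = (t : Int) then PySem.Set.add P (a : Int) else P,
            if c = 0 then PySem.Set.add M (a : Int) else M),
           if (a : Int) < (l.length : Int) then
             c + ((if PySem.List.pyGetD l (a : Int) false then (1 : Int) else 0)
                - (if PySem.List.pyGetD l ((a : Int) - (t : Int)) false then (1 : Int) else 0))
           else c) := rfl
    have hinv : a + 1 ≤ l.length →
        (if (a : Int) < (l.length : Int) then
             c + ((if PySem.List.pyGetD l (a : Int) false then (1 : Int) else 0)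
                - (if PySem.List.pyGetD l ((a : Int) - (t : Int)) false then (1 : Int) else 0))
           else c)
          = ((pvWin l t (a + 1)).countP (fun b => b) : Int) := by
      intro h1
      have halt : a < l.length := by omega
      rw [if_pos (by exact_mod_cast halt)]
      have g1 : PySem.List.pyGetD l (a : Int) false = l.getD a false := by
        rw [PySem.List.pyGetD_natCast]
      have g2 : PySem.List.pyGetD l ((a : Int) - (t : Int)) false = l.getD (a - t) false := by
        rw [show (a : Int) - (t : Int) = ((a - t : Nat) : Int) by omega, PySem.List.pyGetD_natCast]
      rw [g1, g2]
      have wc1 : ((l.take (a - t)).countP (fun b => b) : Int) + ((pvWin l t a).countP (fun b => b) : Int)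
          = ((l.take a).countP (fun b => b) : Int) := by exact_mod_cast pvWin_count l t a ht
      have wc2 : ((l.take (a + 1 - t)).countP (fun b => b) : Int) + ((pvWin l t (a + 1)).countP (fun b => b) : Int)
          = ((l.take (a + 1)).countP (fun b => b) : Int) := by
        exact_mod_cast pvWin_count l t (a + 1) (by omega)
      have ps1 := pvPrefix_step l a halt
      have ps2 := pvPrefix_step l (a - t) (by omega)
      rw [show a - t + 1 = a + 1 - t by omega] at ps2
      rw [hcnt]
      linarith
    rw [PySem.List.pyRange_one_cons (by exact_mod_cast Nat.lt_succ_of_le ha : (a : Int) < (l.length : Int) + 1)]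
    simp only [List.foldl_cons]
    rw [hA, hB]
    rw [show (a : Int) + 1 = ((a + 1 : Nat) : Int) by push_cast; ring]
    exact ih (a + 1) (by omega) (by omega) _ _ _ hinv

-- A's fold only ever adds to the sets
lemma pvFoldA_mono (l : List Bool) (tw : Int) (rng : List Int) (st : List Int × List Int)
    (x : Int) (hx : x ∈ st.1) : x ∈ (rng.foldl (pvStepA l tw) st).1 := by
  induction rng generalizing st with
  | nil => exact hx
  | cons i rest ih =>
    apply ih
    unfold pvStepA
    dsimp only
    split <;> simp [PySem.Set.mem_add, hx]

lemma pvA_zero_mem (l : List Bool) (tw : Int) (hw : tw < 0) :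
    (0 : Int) ∈ (tail_eventually_py l tw).1 := by
  unfold tail_eventually_py
  dsimp only
  rw [PySem.List.pyRange_one_append tw 0 ((l.length : Int) + 1) (by omega) (by omega),
    List.foldl_append,
    PySem.List.pyRange_one_cons (by omega : (0 : Int) < (l.length : Int) + 1)]
  simp only [List.foldl_cons]
  apply pvFoldA_mono
  have hsl : PySem.List.slice l (some ((0 : Int) - tw)) (some (0 : Int)) = [] := by
    rw [PySem.List.slice_toNat l (by omega) (by omega)]
    simp
  unfold pvStepA
  dsimp only
  rw [hsl]
  simp [PySem.Set.mem_add]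

-- ===== VERDICT (by name: the statement is the Claim_ definition above) =====
theorem tail_eventually_py_spec : Claim_unchanged_tail_eventually_py := by
  intro truths tw _ hnd
  have htw : 0 ≤ tw := by
    unfold D_tail_eventually_py at hnd; omega
  have ht : tw = ((tw.toNat : Nat) : Int) := (Int.toNat_of_nonneg htw).symm
  simp only [tail_eventually_py, tail_eventually_py_alt, if_neg (by omega : ¬ tw < 0)]
  have hcnt0 : ((PySem.List.slice truths (some 0) (some tw)).map
        (fun b => if b then (1 : Int) else 0)).sum
      = ((pvWin truths tw.toNat tw.toNat).countP (fun b => b) : Int) := by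
    rw [PySem.List.slice_zero_start, PySem.List.slice_to truths htw]
    rw [PySem.List.sum_map_ite_one_zero]
    unfold pvWin
    simp
  by_cases hle : tw.toNat ≤ truths.length + 1
  · rw [ht]
    rw [ht] at hcnt0
    exact pvLoop truths tw.toNat (truths.length + 1 - tw.toNat) tw.toNat (by omega) le_rfl
      _ _ _ (fun _ => hcnt0)
  · rw [PySem.List.pyRange_one_eq_nil (by omega : ((truths.length : Int) + 1) ≤ tw)]
    rfl

theorem tail_eventually_py_changed : Claim_changed_tail_eventually_py := by
  unfold Claim_changed_tail_eventually_py; decide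

theorem tail_eventually_py_tight : Claim_exact_tail_eventually_py := by
  intro truths tw _ hd
  have hw : tw < 0 := hd
  have h0 := pvA_zero_mem truths tw hw
  intro he
  rw [he] at h0
  simp [tail_eventually_py_alt, hw, PySem.Set.empty] at h0
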